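-- pv_equiv track=rewrite | github.com/Reneromero08/agent-governance-system | CAPABILITY/TOOLS/lite_pack.py | _summarize_markdown
-- ===== SOURCE A (Python) =====
-- def _summarize_markdown(content: str) -> str:
--     """Extract markdown headers and first paragraph."""
--     lines = content.split("\n")
--     summary_lines = []
--     found_first_para = False
--     in_para = False
--
--     for line in lines:
--         stripped = line.strip()
--
--         # Headers
--         if stripped.startswith("#"):
--             summary_lines.append(line)
--             continue
--
--         # First non-empty paragraph
--         if not found_first_para:
--             if stripped and not stripped.startswith("#"):
--                 in_para = True
--                 summary_lines.append(line)
--             elif in_para and not stripped: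
--                 found_first_para = True
--                 in_para = False
--             elif in_para:
--                 summary_lines.append(line)
--
--     return "\n".join(summary_lines) if summary_lines else "[Empty document]"
-- ===== SOURCE B (Python) =====
-- def _is_header(line):
--     return line.strip().startswith("#")
--
--
-- def _is_blank(line):
--     return not line.strip()
--
--
-- def _first_fail(pred, lines):
--     """Index of the first line failing pred (len(lines) if none does)."""
--     n = 0
--     for line in lines:
--         if not pred(line):
--             return n
--         n += 1
--     return n
--
--
-- def _summarize_markdown(content: str) -> str:
--     """Extract markdown headers and first paragraph."""
--     lines = content.split("\n")
--     # first paragraph = lines[i:i+j]: skip blanks/headers, then run to first blank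
--     i = _first_fail(lambda l: _is_blank(l) or _is_header(l), lines)
--     rest = lines[i:]
--     j = _first_fail(lambda l: not _is_blank(l), rest)
--     kept = ([l for l in lines[:i] if _is_header(l)]
--             + rest[:j]
--             + [l for l in rest[j:] if _is_header(l)])
--     return "\n".join(kept) if kept else "[Empty document]"
-- ===== Notes on version B (the rewrite author's own statement) =====
-- stated objective: alternative
-- what changed: Replaced A's single flag-driven scan (found_first_para/in_para state machine) by a slice-based decomposition: compute the first-paragraph span [i, i+j) with two prefix scans, then build the result as headers-before ++ paragraph ++ headers-after.
import Mathlib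
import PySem

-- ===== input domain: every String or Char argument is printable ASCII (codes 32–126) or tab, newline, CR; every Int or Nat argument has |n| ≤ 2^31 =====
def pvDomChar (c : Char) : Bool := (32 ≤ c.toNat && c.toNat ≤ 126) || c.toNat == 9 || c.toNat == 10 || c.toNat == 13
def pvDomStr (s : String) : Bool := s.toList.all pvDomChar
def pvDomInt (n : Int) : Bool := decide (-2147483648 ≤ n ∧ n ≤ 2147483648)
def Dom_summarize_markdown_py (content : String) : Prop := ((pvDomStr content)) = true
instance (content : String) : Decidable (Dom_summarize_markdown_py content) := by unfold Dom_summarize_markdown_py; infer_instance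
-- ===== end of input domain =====

-- B replaces A's flag-driven scan by a slice decomposition (headers-before ++ first paragraph ++ headers-after); alternative, same cost.

-- ===== PORT A =====
def stepA : List String × Bool × Bool → String → List String × Bool × Bool
  | (summary, found, inPara), line =>
    let stripped := PySem.Str.strip line
    if PySem.Str.startswith stripped "#" then (summary ++ [line], found, inPara)
    else if !found then
      if !stripped.toList.isEmpty then (summary ++ [line], found, true)
      else if inPara && stripped.toList.isEmpty then (summary, true, false)
      else if inPara then (summary ++ [line], found, inPara)  -- dead branch of A, kept literal
      else (summary, found, inPara)
    else (summary, found, inPara)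

def summarize_markdown_py (content : String) : String :=
  let lines := (PySem.Str.split? content "\n").getD []   -- sep is the nonempty literal "\n": split? is always `some`, so getD is exact
  let res := lines.foldl stepA ([], false, false)
  if res.1.isEmpty then "[Empty document]" else PySem.Str.join "\n" res.1

-- ===== PORT B =====
def pyIsHeader (line : String) : Bool := PySem.Str.startswith (PySem.Str.strip line) "#"

def pyIsBlank (line : String) : Bool := (PySem.Str.strip line).toList.isEmpty

def pyFirstFail (pred : String → Bool) : List String → Nat
  | [] => 0
  | line :: ls => if pred line then pyFirstFail pred ls + 1 else 0

def summarize_markdown_py_alt (content : String) : String :=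
  let lines := (PySem.Str.split? content "\n").getD []   -- sep is the nonempty literal "\n": split? is always `some`, so getD is exact
  let i := pyFirstFail (fun l => pyIsBlank l || pyIsHeader l) lines
  let rest := lines.drop i          -- lines[i:] with 0 ≤ i ≤ len, so the slice is drop
  let j := pyFirstFail (fun l => !pyIsBlank l) rest
  let kept := (lines.take i).filter pyIsHeader ++ rest.take j ++ (rest.drop j).filter pyIsHeader
  if kept.isEmpty then "[Empty document]" else PySem.Str.join "\n" kept

-- ===== PRECONDITION & SPEC =====
def Spec_summarize_markdown_py (content : String) (out : String) : Prop := out = summarize_markdown_py_alt content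
instance (content : String) (out : String) : Decidable (Spec_summarize_markdown_py content out) := by unfold Spec_summarize_markdown_py; infer_instance

-- ===== CLAIM (what is proved, stated in full; the proofs are below) =====
def Claim_equal_summarize_markdown_py : Prop := ∀ (content : String), Dom_summarize_markdown_py content → Spec_summarize_markdown_py content (summarize_markdown_py content)

-- ===== LEMMAS AND PROOFS =====

-- phase-structured specification of the kept lines: done / inside first paragraph / searching
def gDone : List String → List String
  | [] => []
  | l :: ls => if pyIsHeader l then l :: gDone ls else gDone ls

def gPara : List String → List String
  | [] => []
  | l :: ls => if pyIsHeader l then l :: gPara ls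
               else if pyIsBlank l then gDone ls
               else l :: gPara ls

def gSearch : List String → List String
  | [] => []
  | l :: ls => if pyIsHeader l then l :: gSearch ls
               else if pyIsBlank l then gSearch ls
               else l :: gPara ls

-- stepA re-read through B's two predicates (definitional)
lemma stepA_eq (summary : List String) (found inPara : Bool) (line : String) :
    stepA (summary, found, inPara) line =
      if pyIsHeader line then (summary ++ [line], found, inPara)
      else if !found then
        if !pyIsBlank line then (summary ++ [line], found, true)
        else if inPara && pyIsBlank line then (summary, true, false)
        else if inPara then (summary ++ [line], found, inPara)
        else (summary, found, inPara)
      else (summary, found, inPara) := rfl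

lemma header_not_blank (l : String) (h : pyIsHeader l = true) : pyIsBlank l = false := by
  simp only [pyIsHeader, PySem.Str.startswith_eq, PySem.Str.toList_strip] at h
  rw [PySem.Chars.startswith_iff] at h
  have hne : PySem.Chars.strip l.toList ≠ [] := by
    intro he; rw [he] at h; simpa using h.length_le
  simp [pyIsBlank, hne]

lemma blank_not_header (l : String) (hb : pyIsBlank l = true) : pyIsHeader l = false := by
  cases hx : pyIsHeader l
  · rfl
  · rw [header_not_blank l hx] at hb; exact absurd hb (by simp)

lemma A_done (ls : List String) : ∀ acc, (List.foldl stepA (acc, true, false) ls).1 = acc ++ gDone ls := by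
  induction ls with
  | nil => intro acc; simp [gDone]
  | cons l ls ih =>
    intro acc
    by_cases h : pyIsHeader l = true <;> simp [List.foldl, stepA_eq, gDone, h, ih]

lemma A_para (ls : List String) : ∀ acc, (List.foldl stepA (acc, false, true) ls).1 = acc ++ gPara ls := by
  induction ls with
  | nil => intro acc; simp [gPara]
  | cons l ls ih =>
    intro acc
    by_cases h : pyIsHeader l = true
    · simp [List.foldl, stepA_eq, gPara, h, ih]
    · by_cases hb : pyIsBlank l = true
      · simp [List.foldl, stepA_eq, gPara, h, hb, A_done]
      · simp [List.foldl, stepA_eq, gPara, h, hb, ih]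

lemma A_search (ls : List String) : ∀ acc, (List.foldl stepA (acc, false, false) ls).1 = acc ++ gSearch ls := by
  induction ls with
  | nil => intro acc; simp [gSearch]
  | cons l ls ih =>
    intro acc
    by_cases h : pyIsHeader l = true
    · simp [List.foldl, stepA_eq, gSearch, h, ih]
    · by_cases hb : pyIsBlank l = true
      · simp [List.foldl, stepA_eq, gSearch, h, hb, ih]
      · simp [List.foldl, stepA_eq, gSearch, h, hb, A_para]

lemma B_done (ls : List String) : ls.filter pyIsHeader = gDone ls := by
  induction ls with
  | nil => rfl
  | cons l ls ih => by_cases h : pyIsHeader l = true <;> simp [gDone, h, ih]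

lemma B_para (ls : List String) :
    ls.take (pyFirstFail (fun l => !pyIsBlank l) ls)
      ++ (ls.drop (pyFirstFail (fun l => !pyIsBlank l) ls)).filter pyIsHeader = gPara ls := by
  induction ls with
  | nil => rfl
  | cons l ls ih =>
    by_cases hb : pyIsBlank l = true
    · simp [pyFirstFail, gPara, hb, blank_not_header l hb, B_done]
    · simp [pyFirstFail, gPara, hb, ih]

lemma B_search (ls : List String) :
    (ls.take (pyFirstFail (fun l => pyIsBlank l || pyIsHeader l) ls)).filter pyIsHeader
      ++ ((ls.drop (pyFirstFail (fun l => pyIsBlank l || pyIsHeader l) ls)).take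
            (pyFirstFail (fun l => !pyIsBlank l) (ls.drop (pyFirstFail (fun l => pyIsBlank l || pyIsHeader l) ls)))
          ++ ((ls.drop (pyFirstFail (fun l => pyIsBlank l || pyIsHeader l) ls)).drop
                (pyFirstFail (fun l => !pyIsBlank l) (ls.drop (pyFirstFail (fun l => pyIsBlank l || pyIsHeader l) ls)))).filter pyIsHeader)
      = gSearch ls := by
  induction ls with
  | nil => rfl
  | cons l ls ih =>
    by_cases h : pyIsHeader l = true
    · have hb := header_not_blank l h
      have hq : pyFirstFail (fun l => pyIsBlank l || pyIsHeader l) (l :: ls)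
          = pyFirstFail (fun l => pyIsBlank l || pyIsHeader l) ls + 1 := by
        simp [pyFirstFail, h]
      rw [hq, List.take_succ_cons, List.drop_succ_cons, List.filter_cons]
      simpa [gSearch, h, hb, -List.drop_drop] using ih
    · by_cases hb : pyIsBlank l = true
      · have hq : pyFirstFail (fun l => pyIsBlank l || pyIsHeader l) (l :: ls)
            = pyFirstFail (fun l => pyIsBlank l || pyIsHeader l) ls + 1 := by
          simp [pyFirstFail, hb]
        rw [hq, List.take_succ_cons, List.drop_succ_cons, List.filter_cons]
        simpa [gSearch, h, hb, -List.drop_drop] using ih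
      · have hq : pyFirstFail (fun l => pyIsBlank l || pyIsHeader l) (l :: ls) = 0 := by
          simp [pyFirstFail, h, hb]
        have hn : pyFirstFail (fun l => !pyIsBlank l) (l :: ls)
            = pyFirstFail (fun l => !pyIsBlank l) ls + 1 := by
          simp [pyFirstFail, hb]
        rw [hq]
        simp only [List.take_zero, List.filter_nil, List.drop_zero, List.nil_append]
        rw [hn, List.take_succ_cons, List.drop_succ_cons]
        simpa [gSearch, h, hb, -List.drop_drop] using B_para ls

lemma core (lines : List String) :
    (if (lines.foldl stepA ([], false, false)).1.isEmpty then "[Empty document]"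
     else PySem.Str.join "\n" (lines.foldl stepA ([], false, false)).1)
    = (if ((lines.take (pyFirstFail (fun l => pyIsBlank l || pyIsHeader l) lines)).filter pyIsHeader
          ++ (lines.drop (pyFirstFail (fun l => pyIsBlank l || pyIsHeader l) lines)).take
                (pyFirstFail (fun l => !pyIsBlank l) (lines.drop (pyFirstFail (fun l => pyIsBlank l || pyIsHeader l) lines)))
          ++ ((lines.drop (pyFirstFail (fun l => pyIsBlank l || pyIsHeader l) lines)).drop
                (pyFirstFail (fun l => !pyIsBlank l) (lines.drop (pyFirstFail (fun l => pyIsBlank l || pyIsHeader l) lines)))).filter pyIsHeader).isEmpty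
       then "[Empty document]"
       else PySem.Str.join "\n"
        ((lines.take (pyFirstFail (fun l => pyIsBlank l || pyIsHeader l) lines)).filter pyIsHeader
          ++ (lines.drop (pyFirstFail (fun l => pyIsBlank l || pyIsHeader l) lines)).take
                (pyFirstFail (fun l => !pyIsBlank l) (lines.drop (pyFirstFail (fun l => pyIsBlank l || pyIsHeader l) lines)))
          ++ ((lines.drop (pyFirstFail (fun l => pyIsBlank l || pyIsHeader l) lines)).drop
                (pyFirstFail (fun l => !pyIsBlank l) (lines.drop (pyFirstFail (fun l => pyIsBlank l || pyIsHeader l) lines)))).filter pyIsHeader)) := by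
  rw [List.append_assoc, B_search lines]
  have hA := A_search lines []
  simp only [List.nil_append] at hA
  rw [hA]

-- ===== VERDICT (by name: the statement is the Claim_ definition above) =====
theorem summarize_markdown_py_spec : Claim_equal_summarize_markdown_py := by
  intro content _
  show summarize_markdown_py content = summarize_markdown_py_alt content
  simp only [summarize_markdown_py, summarize_markdown_py_alt]
  exact core ((PySem.Str.split? content "\n").getD [])
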